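/- GENERATED by farm/mkstatement.py from design/units.tsv (unit `decode_residue.6a`) and the assertions of Vorbis/Spec/DecodeResidue46.lean — do not edit.
   THE STATEMENT of the proof unit `decode_residue.6a`: segment 6a of `decode_residue` (31 instructions; entries 0x10f64c,0x10f692,0x10f551;
   exits 0x10f314,0x10f6a0,0x10f692,0x10f551,0x10f64c,0x10f579; ranges 0x10f551-0x10f573 + 0x10f645-0x10f69d)
   takes each of its entry assertions to one of its exit assertions (`Vorbis.Spec.DecodeResidue.Seg6a`), given the contracts of its callees.
   What the names mean: Vorbis/Spec/Basic.lean (the shared hypotheses), Vorbis/Spec/DecodeResidue46.lean (the assertions). The theorem to prove: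
   `theorem decode_residue_6a_ok : Vorbis.Spec.decode_residue_6a.Statement`. -/
import Vorbis.Spec.DecodeResidue46
namespace Vorbis.Spec.decode_residue_6a
open X86 X86.User Asan

/-- The statement of unit `decode_residue.6a`. -/
def Statement : Prop :=
  ∀ (Lay : Layout) (_hLay : Lay.hi = 0x1000000) (μ : Microarch) (_hμ : UserX.MicroOK μ) (u₀ : State)
    (_hcode : HasCodeNat Lay u₀ Vorbis.L.decode_residue.entry Vorbis.Code.code_decode_residue.nat Vorbis.L.decode_residue.size)
    (_h_asan_load4_noabort : Asan.SmallCheck Lay μ Vorbis.WayInv (Vorbis.CodeOK u₀) [.rax, .rcx, .rdx] 4 Vorbis.L.__asan_load4_noabort.entry),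
    Vorbis.Spec.DecodeResidue.Seg6a Lay μ u₀

end Vorbis.Spec.decode_residue_6a
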